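-- pv_equiv track=rewrite | github.com/samvel-melikyan/lesones | functions/generetors_&_yelid.py | generate_user_data
-- ===== SOURCE A (Python) =====
-- def generate_user_data(length, name_list, surname_list, age_list):
--     count = 0
--     for name in name_list:
--         for surname in surname_list:
--             for age in age_list:
--                 if count >= length:
--                     return  # Завершаем генерацию
--                 yield name, surname, age
--                 count += 1
-- ===== SOURCE B (Python) =====
-- def generate_user_data(length, name_list, surname_list, age_list):
--     S = len(surname_list)
--     G = len(age_list)
--     total = len(name_list) * S * G
--     n = min(length, total)
--     for i in range(n):
--         a, r = divmod(i, S * G)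
--         b, c = divmod(r, G)
--         yield name_list[a], surname_list[b], age_list[c]
-- ===== Notes on version B (the rewrite author's own statement) =====
-- stated objective: alternative
-- what changed: Replaces the three nested loops with an early-return counter by a single loop over a flat index range of size min(length, total) whose index is decoded in closed form with divmod into the three list positions.
import Mathlib
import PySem

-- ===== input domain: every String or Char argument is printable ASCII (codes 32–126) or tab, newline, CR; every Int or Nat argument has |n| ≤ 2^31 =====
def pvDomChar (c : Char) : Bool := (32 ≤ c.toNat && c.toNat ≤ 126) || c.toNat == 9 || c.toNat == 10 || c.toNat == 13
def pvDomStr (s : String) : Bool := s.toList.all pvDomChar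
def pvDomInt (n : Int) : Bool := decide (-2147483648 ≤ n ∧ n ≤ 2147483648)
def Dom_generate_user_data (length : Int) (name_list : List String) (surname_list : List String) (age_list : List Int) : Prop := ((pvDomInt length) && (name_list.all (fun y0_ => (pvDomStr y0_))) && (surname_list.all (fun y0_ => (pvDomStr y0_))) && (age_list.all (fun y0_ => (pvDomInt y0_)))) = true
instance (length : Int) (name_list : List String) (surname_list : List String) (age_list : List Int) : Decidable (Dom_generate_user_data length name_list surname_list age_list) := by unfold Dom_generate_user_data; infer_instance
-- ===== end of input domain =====

-- B replaces A's three nested loops with an early-return counter by one loop over a flat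
-- index range, decoding each index with divmod (alternative decomposition, same cost).


-- ===== PORT A =====
-- state: (yielded tuples so far, count, done-flag set when the generator returned)
def guAgeLoop (length : Int) (name surname : String) (age_list : List Int)
    (st : List (String × String × Int) × Int × Bool) : List (String × String × Int) × Int × Bool :=
  age_list.foldl (fun st age =>
    match st with
    | (acc, count, done) =>
      if done then (acc, count, done)
      else if count ≥ length then (acc, count, true)
      else (acc ++ [(name, surname, age)], count + 1, false)) st

def guSurLoop (length : Int) (name : String) (surname_list : List String) (age_list : List Int)
    (st : List (String × String × Int) × Int × Bool) : List (String × String × Int) × Int × Bool :=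
  surname_list.foldl (fun st surname => guAgeLoop length name surname age_list st) st

def generate_user_data (length : Int) (name_list : List String) (surname_list : List String) (age_list : List Int) : List (String × String × Int) :=
  (name_list.foldl (fun st name => guSurLoop length name surname_list age_list st) ([], 0, false)).1

-- ===== PORT B =====
-- pyGetD with a default is exact here: Source B's indices are always in range on the loop's domain.
def generate_user_data_alt (length : Int) (name_list : List String) (surname_list : List String) (age_list : List Int) : List (String × String × Int) :=
  let S : Int := surname_list.length
  let G : Int := age_list.length
  let total : Int := name_list.length * S * G
  let n : Int := min length total
  (PySem.List.pyRange 0 n 1).map (fun i =>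
    let a := PySem.Int.floordiv i (S * G)
    let r := PySem.Int.mod i (S * G)
    let b := PySem.Int.floordiv r G
    let c := PySem.Int.mod r G
    (PySem.List.pyGetD name_list a "", PySem.List.pyGetD surname_list b "", PySem.List.pyGetD age_list c 0))

-- ===== PRECONDITION & SPEC =====
def Spec_generate_user_data (length : Int) (name_list : List String) (surname_list : List String) (age_list : List Int) (out : List (String × String × Int)) : Prop := out = generate_user_data_alt length name_list surname_list age_list
instance (length : Int) (name_list : List String) (surname_list : List String) (age_list : List Int) (out : List (String × String × Int)) : Decidable (Spec_generate_user_data length name_list surname_list age_list out) := by unfold Spec_generate_user_data; infer_instance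

-- ===== CLAIM (what is proved, stated in full; the proofs are below) =====
def Claim_equal_generate_user_data : Prop := ∀ (length : Int) (name_list : List String) (surname_list : List String) (age_list : List Int), Dom_generate_user_data length name_list surname_list age_list → Spec_generate_user_data length name_list surname_list age_list (generate_user_data length name_list surname_list age_list)

-- ===== LEMMAS AND PROOFS =====

-- the generic one-element step of A's generator, on already-built tuples
def guStep (length : Int) (st : List (String × String × Int) × Int × Bool)
    (r : String × String × Int) : List (String × String × Int) × Int × Bool :=
  match st with
  | (acc, count, done) =>
    if done then (acc, count, done)
    else if count ≥ length then (acc, count, true)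
    else (acc ++ [r], count + 1, false)

-- the flat product list, name slowest / age fastest
def guProd (name_list surname_list : List String) (age_list : List Int) : List (String × String × Int) :=
  name_list.flatMap (fun nm => surname_list.flatMap (fun sn => age_list.map (fun ag => (nm, sn, ag))))

theorem guStep_done (length : Int) (xs : List (String × String × Int)) (acc : List (String × String × Int)) (count : Int) :
    xs.foldl (guStep length) (acc, count, true) = (acc, count, true) := by
  induction xs with
  | nil => rfl
  | cons x xs ih => simpa [guStep] using ih

theorem guAgeLoop_eq (length : Int) (nm sn : String) (ages : List Int) (st : List (String × String × Int) × Int × Bool) :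
    guAgeLoop length nm sn ages st = (ages.map (fun ag => (nm, sn, ag))).foldl (guStep length) st := by
  rw [List.foldl_map]; rfl

theorem guSurLoop_eq (length : Int) (nm : String) (sns : List String) (ages : List Int) (st : List (String × String × Int) × Int × Bool) :
    guSurLoop length nm sns ages st = (sns.flatMap (fun sn => ages.map (fun ag => (nm, sn, ag)))).foldl (guStep length) st := by
  induction sns generalizing st with
  | nil => rfl
  | cons s sns ih =>
    simp only [guSurLoop, List.foldl_cons, List.flatMap_cons, List.foldl_append]
    rw [← ih]
    simp [guSurLoop, guAgeLoop_eq]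

theorem guOuter_eq (length : Int) (nms sns : List String) (ages : List Int) (st : List (String × String × Int) × Int × Bool) :
    nms.foldl (fun st nm => guSurLoop length nm sns ages st) st
      = (guProd nms sns ages).foldl (guStep length) st := by
  induction nms generalizing st with
  | nil => rfl
  | cons nm nms ih =>
    simp only [List.foldl_cons, guProd, List.flatMap_cons, List.foldl_append]
    rw [ih, guSurLoop_eq]; rfl

theorem guRun (length : Int) (xs : List (String × String × Int)) :
    ∀ (acc : List (String × String × Int)) (count : Int),
    (xs.foldl (guStep length) (acc, count, false)).1 = acc ++ xs.take (length - count).toNat := by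
  induction xs with
  | nil => intro acc count; simp
  | cons x xs ih =>
    intro acc count
    by_cases h : count ≥ length
    · have ht : (length - count).toNat = 0 := by omega
      simp [guStep, h, guStep_done, ht]
    · have ht : (length - count).toNat = (length - (count + 1)).toNat + 1 := by omega
      have hstep : guStep length (acc, count, false) x = (acc ++ [x], count + 1, false) := by
        simp [guStep, h]
      rw [List.foldl_cons, hstep, ih, ht, List.take_succ_cons]
      simp

theorem portA_eq (length : Int) (nms sns : List String) (ages : List Int) :
    generate_user_data length nms sns ages = (guProd nms sns ages).take length.toNat := by
  unfold generate_user_data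
  rw [guOuter_eq, guRun]
  simp

-- uniform flat indexing: element i of a flatMap with constant inner length L
theorem getElem?_flatMap_uniform {α β : Type} (g : α → List β) (L : Nat) :
    ∀ (xs : List α), (∀ a ∈ xs, (g a).length = L) → ∀ (i : Nat), i < xs.length * L →
    (xs.flatMap g)[i]? = xs[i / L]?.bind (fun a => (g a)[i % L]?) := by
  intro xs
  induction xs with
  | nil => intro _ i hi; simp at hi
  | cons x xs ih =>
    intro h i hi
    have hL : 0 < L := Nat.pos_of_ne_zero (by rintro rfl; simp at hi)
    have hx : (g x).length = L := h x (List.mem_cons_self ..)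
    have hi' : i < xs.length * L + L := by
      have : (x :: xs).length * L = xs.length * L + L := by
        simp [Nat.succ_mul]
      omega
    by_cases hiL : i < L
    · have hd : i / L = 0 := Nat.div_eq_of_lt hiL
      have hm : i % L = i := Nat.mod_eq_of_lt hiL
      rw [List.flatMap_cons, List.getElem?_append_left (by omega), hd, hm]
      simp
    · have hle : L ≤ i := by omega
      have hdiv : i / L = (i - L) / L + 1 := Nat.div_eq_sub_div hL hle
      have hmod : i % L = (i - L) % L := by
        rw [Nat.mod_eq_sub_mod hle]
      rw [List.flatMap_cons, List.getElem?_append_right (by omega), hx,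
        ih (fun a ha => h a (List.mem_cons_of_mem _ ha)) (i - L) (by omega),
        hdiv, hmod]
      simp

theorem inner_len (nm : String) (sns : List String) (ages : List Int) :
    (sns.flatMap (fun sn => ages.map (fun ag => (nm, sn, ag)))).length = sns.length * ages.length := by
  induction sns with
  | nil => simp
  | cons s sns ih => simp [ih]; ring

theorem guProd_len (nms sns : List String) (ages : List Int) :
    (guProd nms sns ages).length = nms.length * (sns.length * ages.length) := by
  unfold guProd
  induction nms with
  | nil => simp
  | cons nm nms ih => simp [ih]; ring

theorem guProd_getElem? (nms sns : List String) (ages : List Int) (i : Nat)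
    (hi : i < nms.length * (sns.length * ages.length)) :
    (guProd nms sns ages)[i]?
      = some (nms.getD (i / (sns.length * ages.length)) "",
              sns.getD (i % (sns.length * ages.length) / ages.length) "",
              ages.getD (i % (sns.length * ages.length) % ages.length) 0) := by
  have hG : 0 < ages.length := Nat.pos_of_ne_zero (by rintro h0; rw [h0] at hi; simp at hi)
  have hSG : 0 < sns.length * ages.length :=
    Nat.pos_of_ne_zero (by rintro h0; rw [h0] at hi; simp at hi)
  have h1 := getElem?_flatMap_uniform (fun nm => sns.flatMap (fun sn => ages.map (fun ag => (nm, sn, ag))))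
      (sns.length * ages.length) nms (fun a _ => inner_len a sns ages) i hi
  unfold guProd
  rw [h1]
  have hidx : i / (sns.length * ages.length) < nms.length :=
    Nat.div_lt_of_lt_mul (Nat.mul_comm _ _ ▸ hi)
  have hmlt : i % (sns.length * ages.length) < sns.length * ages.length := Nat.mod_lt _ hSG
  have hb : i % (sns.length * ages.length) / ages.length < sns.length :=
    Nat.div_lt_of_lt_mul (by rw [Nat.mul_comm ages.length sns.length]; exact hmlt)
  have hc : i % (sns.length * ages.length) % ages.length < ages.length := Nat.mod_lt _ hG
  rw [List.getElem?_eq_getElem hidx]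
  simp only [Option.bind_some]
  rw [getElem?_flatMap_uniform (fun sn => ages.map (fun ag => (nms[i / (sns.length * ages.length)]'hidx, sn, ag)))
      ages.length sns (by intro a _; simp) (i % (sns.length * ages.length)) hmlt]
  rw [List.getElem?_eq_getElem hb]
  simp only [Option.bind_some, List.getElem?_map, List.getElem?_eq_getElem hc, Option.map_some]
  rw [List.getD_eq_getElem _ _ hidx, List.getD_eq_getElem _ _ hb, List.getD_eq_getElem _ _ hc]

theorem portB_eq (length : Int) (nms sns : List String) (ages : List Int) :
    generate_user_data_alt length nms sns ages
      = (guProd nms sns ages).take (min length ((guProd nms sns ages).length : Int)).toNat := by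
  unfold generate_user_data_alt
  set T : Nat := nms.length * (sns.length * ages.length) with hT
  have hlen : (guProd nms sns ages).length = T := guProd_len nms sns ages
  have htot : (nms.length : Int) * (sns.length : Int) * (ages.length : Int) = (T : Int) := by
    push_cast [hT]; ring
  simp only [htot, hlen]
  set n : Int := min length (T : Int) with hn
  have hn0 : n ≤ (T : Int) := min_le_right _ _
  rw [PySem.List.pyRange_one]
  apply List.ext_getElem
  · simp [hlen]; omega
  · intro k hk1 hk2
    simp only [List.getElem_map, List.getElem_range, List.getElem_take]
    have hkT : k < T := by simp at hk1; omega
    have hSG : ((sns.length : Int) * (ages.length : Int)) = ((sns.length * ages.length : Nat) : Int) := by push_cast; ring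
    have hA := guProd_getElem? nms sns ages k (by omega)
    have hgk : (guProd nms sns ages)[k]'(by omega) =
        (nms.getD (k / (sns.length * ages.length)) "",
         sns.getD (k % (sns.length * ages.length) / ages.length) "",
         ages.getD (k % (sns.length * ages.length) % ages.length) 0) := by
      have := List.getElem?_eq_getElem (l := guProd nms sns ages) (i := k) (by omega)
      rw [this] at hA; exact Option.some.injEq _ _ ▸ hA
    rw [hgk]
    simp only [zero_add, hSG, PySem.Int.floordiv_natCast, PySem.Int.mod_natCast,
      PySem.List.pyGetD_natCast]

theorem take_min_len {α : Type} (xs : List α) (a : Int) :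
    xs.take (min a (xs.length : Int)).toNat = xs.take a.toNat := by
  by_cases h : a ≤ (xs.length : Int)
  · rw [min_eq_left h]
  · have h1 : (min a (xs.length : Int)).toNat = xs.length := by omega
    have h2 : xs.length ≤ a.toNat := by omega
    rw [h1, List.take_length, List.take_of_length_le h2]

-- ===== VERDICT (by name: the statement is the Claim_ definition above) =====
theorem generate_user_data_spec : Claim_equal_generate_user_data := by
  intro length nms sns ages _
  unfold Spec_generate_user_data
  rw [portA_eq, portB_eq, take_min_len]
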